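-- pv_equiv track=rewrite | github.com/jeff8971/self_project | plate_name_primer_well/original/vlad_test2.py | type_to_plate
-- ===== SOURCE A (Python) =====
-- def primer_list(file_list: list) -> list:
--     '''
--     :function: analysis the directive_file.txt into a list with sublist
--     :parameter: .txt
--     :return all_primer_list
--     every sublist is 4 elements
--     [0] template: template name
--     [1] well: well number
--     [2] primer: primer name
--     [3] comment: email or order#
--     '''
--
--     all_primer_list = []
--     for i in range(1, len(file_list)):
--         reaction = file_list[i]
--         current_primers = reaction[2]
--         current_primers_list = current_primers.split(";")
--
--         for each in current_primers_list:
--             if each not in all_primer_list: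
--                 all_primer_list.append(each)
--
--     return all_primer_list
--
-- def sample_primers_dict(file_list: list) -> list:
--     '''
--
--     :param file_list: whole file list
--     :return: the dictionary, key is the sample name, value is the primer list
--     '''
--     sam_prim_dict = {}
--     for i in range(1, len(file_list)):
--         cur_primer = file_list[i][0]
--         cur_primer_list = file_list[i][2].split(";")
--         sam_prim_dict[cur_primer] = cur_primer_list
--
--     return sam_prim_dict
--
-- def sample_list(file_list: list) -> list:
--     '''
--
--     :param file_list: whole file list
--     :return: the sample list
--     '''
--
--     all_sample_list = []
--     for i in range(1, len(file_list)):
--         reaction = file_list[i]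
--         sample = reaction[0]
--         all_sample_list.append(sample)
--
--     return all_sample_list
--
-- def type_to_plate(file_list: list):
--
--     '''
--     plate list for type, sample, primer
--     :param file_list: file_original list
--     :return: plate list for type.
--     '''
--     all_primers_l = primer_list(file_list)
--     all_sample_l = sample_list(file_list)
--     samp_primer_d = sample_primers_dict(file_list)
--
--     # plate layout for type in
--     plate_type_l = []
--
--     for i in range(len(all_primers_l)):
--         curr_primer = all_primers_l[i]
--
--         for j in range(len(all_sample_l)):
--             curr_sample = all_sample_l[j]
--             curr_s_p_l = []
--
--             if curr_primer in samp_primer_d[curr_sample]: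
--                 curr_s_p_l.append(curr_sample)
--                 curr_s_p_l.append(curr_primer)
--                 plate_type_l.append(curr_s_p_l)
--
--     return plate_type_l
-- ===== SOURCE B (Python) =====
-- def type_to_plate(file_list: list):
--     """Index primer->samples in one pass over the rows, then emit [sample, primer]
--     pairs in first-appearance primer order pairs grouped per primer."""
--     rows = file_list[1:]
--     samp_primer_d = {}
--     primer_order = []
--     seen = set()
--     for row in rows:
--         primers = row[2].split(";")
--         samp_primer_d[row[0]] = primers
--         for p in primers:
--             if p not in seen:
--                 primer_order.append(p)
--                 seen.add(p)
--     idx = {}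
--     for row in rows:
--         s = row[0]
--         for p in dict.fromkeys(samp_primer_d[s]):
--             idx.setdefault(p, []).append(s)
--     out = []
--     for p in primer_order:
--         out.extend([s, p] for s in idx.get(p, []))
--     return out
-- ===== Notes on version B (the rewrite author's own statement) =====
-- stated objective: alternative
-- what changed: B makes one pass over the rows to build the sample->primers dict and the first-appearance primer order, then builds a primer->samples index in one more pass and emits the pairs per primer, replacing A's three preparatory passes and its primer x sample nested loop with an inner list-membership scan.
import Mathlib
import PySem

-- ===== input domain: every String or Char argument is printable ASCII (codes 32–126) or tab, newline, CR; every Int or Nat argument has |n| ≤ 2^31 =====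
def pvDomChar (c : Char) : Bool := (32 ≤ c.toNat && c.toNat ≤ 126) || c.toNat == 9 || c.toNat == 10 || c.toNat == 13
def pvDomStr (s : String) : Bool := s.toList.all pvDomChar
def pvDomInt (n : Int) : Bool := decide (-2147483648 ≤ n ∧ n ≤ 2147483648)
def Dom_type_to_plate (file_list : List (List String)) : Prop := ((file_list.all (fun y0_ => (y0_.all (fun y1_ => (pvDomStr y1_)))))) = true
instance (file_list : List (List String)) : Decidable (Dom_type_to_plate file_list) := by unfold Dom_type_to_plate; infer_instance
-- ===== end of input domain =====

-- B replaces A's primer×sample nested membership scan by a one-pass primer→samples index (objective: alternative).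

-- ===== PORT A =====
-- row[0] / row[2]; Python raises IndexError on a short row — those inputs are excluded by Pre_ (the "" default is never reached inside Pre_)
def pvRow0 (r : List String) : String := (PySem.List.pyGet? r 0).getD ""
def pvRow2 (r : List String) : String := (PySem.List.pyGet? r 2).getD ""
-- s.split(";"): split? is none only for an empty separator, so getD [] is exact here
def pvSplit (s : String) : List String := (PySem.Str.split? s ";").getD []

def pvPrimerList (file_list : List (List String)) : List String :=
  (file_list.drop 1).foldl (fun acc r =>
    (pvSplit (pvRow2 r)).foldl (fun a p => if p ∈ a then a else a ++ [p]) acc) []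

def pvSampleList (file_list : List (List String)) : List String :=
  (file_list.drop 1).foldl (fun acc r => acc ++ [pvRow0 r]) []

def pvSamPrimDict (file_list : List (List String)) : PySem.Dict String (List String) :=
  (file_list.drop 1).foldl
    (fun d r => d.insert (pvRow0 r) (pvSplit (pvRow2 r))) PySem.Dict.empty

def type_to_plate (file_list : List (List String)) : List (List String) :=
  (pvPrimerList file_list).foldl (fun plate p =>
    (pvSampleList file_list).foldl (fun plate s =>
      if p ∈ (pvSamPrimDict file_list).getD s [] then plate ++ [[s, p]] else plate) plate) []

-- ===== PORT B =====
-- one row of B's first loop: update the sample→primers dict and the (primer_order, seen) dedup pair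
def pvBStep1 (st : PySem.Dict String (List String) × List String × PySem.Set String)
    (r : List String) : PySem.Dict String (List String) × List String × PySem.Set String :=
  let primers := pvSplit (pvRow2 r)
  let os := primers.foldl
    (fun (os : List String × PySem.Set String) p =>
      if p ∈ os.2 then os else (os.1 ++ [p], PySem.Set.add os.2 p)) (st.2.1, st.2.2)
  (st.1.insert (pvRow0 r) primers, os.1, os.2)

def type_to_plate_alt (file_list : List (List String)) : List (List String) :=
  let rows := file_list.drop 1
  let st := rows.foldl pvBStep1 (PySem.Dict.empty, [], PySem.Set.empty)
  let idx := rows.foldl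
    (fun (idx : PySem.Dict String (List String)) r =>
      (PySem.List.dedup (st.1.getD (pvRow0 r) [])).foldl
        (fun idx p => idx.modify p [] (· ++ [pvRow0 r])) idx) PySem.Dict.empty
  st.2.1.foldl (fun out p => out ++ (idx.getD p []).map (fun s => [s, p])) []

-- ===== PRECONDITION & SPEC =====
-- Pre_ excludes exactly the inputs where A raises IndexError: a data row (after the header) with fewer than 3 fields.
def Pre_type_to_plate (file_list : List (List String)) : Prop :=
  ∀ r ∈ file_list.drop 1, 3 ≤ r.length
instance (file_list : List (List String)) : Decidable (Pre_type_to_plate file_list) := by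
  unfold Pre_type_to_plate; infer_instance
def pvWitness_type_to_plate : List (List String) :=
  [["sample", "well", "primer"], ["s1", "A1", "p1;p2"], ["s2", "A2", "p2"]]

def Spec_type_to_plate (file_list : List (List String)) (out : List (List String)) : Prop := out = type_to_plate_alt file_list
instance (file_list : List (List String)) (out : List (List String)) : Decidable (Spec_type_to_plate file_list out) := by unfold Spec_type_to_plate; infer_instance

-- ===== CLAIM (what is proved, stated in full; the proofs are below) =====
def Claim_equal_type_to_plate : Prop := ∀ (file_list : List (List String)), Dom_type_to_plate file_list → Pre_type_to_plate file_list → Spec_type_to_plate file_list (type_to_plate file_list)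

-- ===== LEMMAS AND PROOFS =====

-- B's first loop: the dict component is A's sample→primers dict
theorem pv_fold1_dict (rows : List (List String))
    (st : PySem.Dict String (List String) × List String × PySem.Set String) :
    (rows.foldl pvBStep1 st).1
    = rows.foldl (fun d r => d.insert (pvRow0 r) (pvSplit (pvRow2 r))) st.1 := by
  induction rows generalizing st with
  | nil => rfl
  | cons r t ih => rw [List.foldl_cons, List.foldl_cons, ih]; rfl

-- the (primer_order, seen) components run A's dedup loop in lock-step
theorem pv_dedup_inner (ps : List String) (acc : List String) :
    ps.foldl (fun (os : List String × PySem.Set String) p =>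
        if p ∈ os.2 then os else (os.1 ++ [p], PySem.Set.add os.2 p)) (acc, acc)
    = (ps.foldl (fun a p => if p ∈ a then a else a ++ [p]) acc,
       ps.foldl (fun a p => if p ∈ a then a else a ++ [p]) acc) := by
  induction ps generalizing acc with
  | nil => rfl
  | cons p t ih =>
      by_cases h : p ∈ acc
      · simpa [h] using ih acc
      · have hadd : PySem.Set.add acc p = acc ++ [p] := by
          simp [PySem.Set.add, PySem.Set.contains, h]
        simpa [h, hadd] using ih (acc ++ [p])

theorem pv_fold1_ord (rows : List (List String))
    (st : PySem.Dict String (List String) × List String × PySem.Set String)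
    (hinv : st.2.2 = st.2.1) :
    (rows.foldl pvBStep1 st).2.1
    = rows.foldl (fun acc r =>
        (pvSplit (pvRow2 r)).foldl
          (fun a p => if p ∈ a then a else a ++ [p]) acc) st.2.1 := by
  induction rows generalizing st with
  | nil => rfl
  | cons r t ih =>
      rw [List.foldl_cons, List.foldl_cons]
      have hstep : pvBStep1 st r
          = (st.1.insert (pvRow0 r) (pvSplit (pvRow2 r)),
             (pvSplit (pvRow2 r)).foldl
               (fun a p => if p ∈ a then a else a ++ [p]) st.2.1,
             (pvSplit (pvRow2 r)).foldl
               (fun a p => if p ∈ a then a else a ++ [p]) st.2.1) := by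
        simp [pvBStep1, hinv, pv_dedup_inner]
      rw [hstep, ih _ rfl]

-- inner modify loop: effect on one key
theorem pv_modify_inner (ps : List String) (h : ps.Nodup) (s : String)
    (idx : PySem.Dict String (List String)) (c : String) :
    (ps.foldl (fun idx p => idx.modify p [] (· ++ [s])) idx).getD c []
    = idx.getD c [] ++ (if c ∈ ps then [s] else []) := by
  induction ps generalizing idx with
  | nil => simp
  | cons p t ih =>
      rw [List.foldl_cons]
      rcases List.nodup_cons.mp h with ⟨hp, ht⟩
      by_cases hc : c = p
      · subst hc
        rw [ih ht]
        simp [hp, PySem.Dict.getD_modify_self]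
      · rw [ih ht]
        simp [PySem.Dict.getD_modify, hc, List.mem_cons]

-- the index dict holds, at key c, exactly the samples (in order) whose primer list contains c
theorem pv_idx_getD (rows : List (List String)) (d : PySem.Dict String (List String))
    (idx : PySem.Dict String (List String)) (c : String) :
    ((rows.foldl
      (fun (idx : PySem.Dict String (List String)) r =>
        (PySem.List.dedup (d.getD (pvRow0 r) [])).foldl
          (fun idx p => idx.modify p [] (· ++ [pvRow0 r])) idx) idx)).getD c []
    = idx.getD c []
      ++ (rows.map pvRow0).filter (fun s => decide (c ∈ d.getD s [])) := by
  induction rows generalizing idx with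
  | nil => simp
  | cons r t ih =>
      rw [List.foldl_cons, ih, pv_modify_inner _ (PySem.List.nodup_dedup _) _ _ _]
      by_cases hc : c ∈ d.getD (pvRow0 r) []
      · simp [hc]
      · simp [hc]

theorem pv_sample_list_eq (file_list : List (List String)) :
    pvSampleList file_list = (file_list.drop 1).map pvRow0 := by
  unfold pvSampleList
  rw [PySem.List.foldl_append_singleton_eq_map]
  simp

theorem pv_samprim_dict_eq (file_list : List (List String)) :
    (((file_list.drop 1).foldl pvBStep1 (PySem.Dict.empty, [], PySem.Set.empty)) :
      PySem.Dict String (List String) × List String × PySem.Set String).1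
    = pvSamPrimDict file_list := by
  rw [pv_fold1_dict]; rfl

theorem pv_order_eq (file_list : List (List String)) :
    (((file_list.drop 1).foldl pvBStep1 (PySem.Dict.empty, [], PySem.Set.empty)) :
      PySem.Dict String (List String) × List String × PySem.Set String).2.1
    = pvPrimerList file_list := by
  rw [pv_fold1_ord _ _ rfl]; rfl

-- ===== VERDICT (by name: the statement is the Claim_ definition above) =====
theorem type_to_plate_spec : Claim_equal_type_to_plate := by
  intro fl _ _
  unfold Spec_type_to_plate type_to_plate type_to_plate_alt
  simp only [pv_samprim_dict_eq, pv_order_eq]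
  apply PySem.List.foldl_congr_mem
  intro acc p _
  rw [PySem.List.foldl_append_ite (p := fun s => p ∈ (pvSamPrimDict fl).getD s [])
        (f := fun s => [s, p])]
  rw [pv_idx_getD, pv_sample_list_eq]
  simp
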